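-- pv_equiv track=rewrite | github.com/TheTokenCompany/Benchmarks | mrcr_v2/run_benchmark.py | get_context_bin
-- ===== SOURCE A (Python) =====
-- def get_context_bin(n_chars: int) -> str:
--     """Map character count to a context-length bin label."""
--     # Approximate token bins (chars / ~4 ≈ tokens) matching MRCR's 8 bins
--     bins = [
--         (0, 32768, "4k-8k tokens"),
--         (32768, 65536, "8k-16k tokens"),
--         (65536, 131072, "16k-32k tokens"),
--         (131072, 262144, "32k-64k tokens"),
--         (262144, 524288, "64k-128k tokens"),
--         (524288, 1048576, "128k-256k tokens"),
--         (1048576, 2097152, "256k-512k tokens"),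
--         (2097152, float("inf"), "512k-1M tokens"),
--     ]
--     for low, high, label in bins:
--         if low <= n_chars < high:
--             return label
--     return "unknown"
-- ===== SOURCE B (Python) =====
-- _LABELS = [
--     "4k-8k tokens",
--     "8k-16k tokens",
--     "16k-32k tokens",
--     "32k-64k tokens",
--     "64k-128k tokens",
--     "128k-256k tokens",
--     "256k-512k tokens",
--     "512k-1M tokens",
-- ]
--
--
-- def get_context_bin(n_chars: int) -> str:
--     """Map character count to a context-length bin label."""
--     if n_chars < 0:
--         return "unknown"
--     if n_chars < 32768:
--         return _LABELS[0]
--     # all bin boundaries are powers of two (2^15 .. 2^21)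
--     return _LABELS[min(n_chars.bit_length() - 15, 7)]
-- ===== Notes on version B (the rewrite author's own statement) =====
-- stated objective: idiomatic
-- what changed: Replaces the linear scan over (low, high, label) tuples with a direct arithmetic bin index computed from bit_length, exploiting that all boundaries are powers of two.
import Mathlib
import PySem

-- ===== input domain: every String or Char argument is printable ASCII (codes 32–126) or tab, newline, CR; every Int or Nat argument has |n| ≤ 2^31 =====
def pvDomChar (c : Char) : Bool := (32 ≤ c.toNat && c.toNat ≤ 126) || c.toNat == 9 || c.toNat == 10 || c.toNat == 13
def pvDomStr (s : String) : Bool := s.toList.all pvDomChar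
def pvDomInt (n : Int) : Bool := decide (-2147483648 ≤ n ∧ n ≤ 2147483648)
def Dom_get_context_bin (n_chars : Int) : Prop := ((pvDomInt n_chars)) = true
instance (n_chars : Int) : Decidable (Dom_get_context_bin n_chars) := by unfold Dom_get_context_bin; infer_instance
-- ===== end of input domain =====

-- B replaces A's linear scan over (low, high, label) tuples by a direct bit_length-based
-- bin index (all boundaries are powers of two); objective: idiomatic/alternative.

-- ===== PORT A =====
-- A's bins: float('inf') as the high bound is represented by `none` (the comparison
-- n < inf is always true in Python; `none` makes the condition's second half true).
def binsA : List (Int × Option Int × String) :=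
  [ (0, some 32768, "4k-8k tokens"),
    (32768, some 65536, "8k-16k tokens"),
    (65536, some 131072, "16k-32k tokens"),
    (131072, some 262144, "32k-64k tokens"),
    (262144, some 524288, "64k-128k tokens"),
    (524288, some 1048576, "128k-256k tokens"),
    (1048576, some 2097152, "256k-512k tokens"),
    (2097152, none, "512k-1M tokens") ]

-- the `for low, high, label in bins` loop with its early return
def scanBinsA (n : Int) : List (Int × Option Int × String) → String
  | [] => "unknown"
  | (low, high, label) :: rest =>
      if low ≤ n && (match high with | none => true | some h => decide (n < h)) then label
      else scanBinsA n rest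

def get_context_bin (n_chars : Int) : String := scanBinsA n_chars binsA

-- ===== PORT B =====
def labelsB : List String :=
  [ "4k-8k tokens", "8k-16k tokens", "16k-32k tokens", "32k-64k tokens",
    "64k-128k tokens", "128k-256k tokens", "256k-512k tokens", "512k-1M tokens" ]

def get_context_bin_alt (n_chars : Int) : String :=
  if n_chars < 0 then "unknown"
  else if n_chars < 32768 then labelsB[0]!
  else labelsB.getD (min (PySem.Int.bitLength n_chars - 15) 7) "unknown"

-- ===== PRECONDITION & SPEC =====
def Spec_get_context_bin (n_chars : Int) (out : String) : Prop := out = get_context_bin_alt n_chars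
instance (n_chars : Int) (out : String) : Decidable (Spec_get_context_bin n_chars out) := by unfold Spec_get_context_bin; infer_instance

-- ===== CLAIM (what is proved, stated in full; the proofs are below) =====
def Claim_equal_get_context_bin : Prop := ∀ (n_chars : Int), Dom_get_context_bin n_chars → Spec_get_context_bin n_chars (get_context_bin n_chars)

-- ===== LEMMAS AND PROOFS =====

-- bitLength is pinned by a power-of-two bracket
lemma bitLength_eq_of_bracket (k : Nat) (n : Int)
    (h1 : (2 ^ k : Int) ≤ n) (h2 : n < 2 ^ (k + 1)) :
    PySem.Int.bitLength n = k + 1 := by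
  have hn : n ≠ 0 := by
    have hpow : (0:Int) < 2 ^ k := by positivity
    omega
  have hlo := PySem.Int.two_pow_bitLength_le n hn
  have hhi := PySem.Int.lt_two_pow_bitLength n
  have habs : n.natAbs = n.toNat := by omega
  have h1' : 2 ^ k ≤ n.natAbs := by
    have : (2 ^ k : Int) ≤ n.natAbs := by omega
    exact_mod_cast this
  have h2' : n.natAbs < 2 ^ (k + 1) := by
    have : (n.natAbs : Int) < 2 ^ (k + 1) := by omega
    exact_mod_cast this
  set bl := PySem.Int.bitLength n with hbl
  by_contra hne
  rcases Nat.lt_or_ge bl (k + 1) with h | h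
  · have : (2 : Nat) ^ bl ≤ 2 ^ k := Nat.pow_le_pow_right (by norm_num) (by omega)
    omega
  · have hge : k + 2 ≤ bl := by omega
    have : (2 : Nat) ^ (k + 1) ≤ 2 ^ (bl - 1) := Nat.pow_le_pow_right (by norm_num) (by omega)
    omega

lemma bitLength_ge_of_le (k : Nat) (n : Int) (h1 : (2 ^ k : Int) ≤ n) :
    k + 1 ≤ PySem.Int.bitLength n := by
  have hn : n ≠ 0 := by
    have hpow : (0:Int) < 2 ^ k := by positivity
    omega
  have hhi := PySem.Int.lt_two_pow_bitLength n
  have h1' : 2 ^ k ≤ n.natAbs := by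
    have : (2 ^ k : Int) ≤ n.natAbs := by omega
    exact_mod_cast this
  by_contra hne
  have : (2 : Nat) ^ PySem.Int.bitLength n ≤ 2 ^ k :=
    Nat.pow_le_pow_right (by norm_num) (by omega)
  omega

-- ===== VERDICT (by name: the statement is the Claim_ definition above) =====
set_option maxHeartbeats 1000000 in
theorem get_context_bin_spec : Claim_equal_get_context_bin := by
  intro n _
  unfold Spec_get_context_bin get_context_bin get_context_bin_alt
  by_cases h0 : n < 0
  · simp only [binsA, scanBinsA, labelsB, decide_eq_true_eq, Bool.and_eq_true, and_true]
    split_ifs <;> first | rfl | (exfalso; omega)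
  by_cases h1 : n < 32768
  · simp only [binsA, scanBinsA, labelsB, decide_eq_true_eq, Bool.and_eq_true, and_true]
    split_ifs <;> first | rfl | (exfalso; omega)
  by_cases h2 : n < 65536
  · rw [bitLength_eq_of_bracket 15 n (by omega) (by omega)]
    simp only [binsA, scanBinsA, labelsB, decide_eq_true_eq, Bool.and_eq_true, and_true]
    split_ifs <;> first | rfl | (exfalso; omega)
  by_cases h3 : n < 131072
  · rw [bitLength_eq_of_bracket 16 n (by omega) (by omega)]
    simp only [binsA, scanBinsA, labelsB, decide_eq_true_eq, Bool.and_eq_true, and_true]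
    split_ifs <;> first | rfl | (exfalso; omega)
  by_cases h4 : n < 262144
  · rw [bitLength_eq_of_bracket 17 n (by omega) (by omega)]
    simp only [binsA, scanBinsA, labelsB, decide_eq_true_eq, Bool.and_eq_true, and_true]
    split_ifs <;> first | rfl | (exfalso; omega)
  by_cases h5 : n < 524288
  · rw [bitLength_eq_of_bracket 18 n (by omega) (by omega)]
    simp only [binsA, scanBinsA, labelsB, decide_eq_true_eq, Bool.and_eq_true, and_true]
    split_ifs <;> first | rfl | (exfalso; omega)
  by_cases h6 : n < 1048576
  · rw [bitLength_eq_of_bracket 19 n (by omega) (by omega)]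
    simp only [binsA, scanBinsA, labelsB, decide_eq_true_eq, Bool.and_eq_true, and_true]
    split_ifs <;> first | rfl | (exfalso; omega)
  by_cases h7 : n < 2097152
  · rw [bitLength_eq_of_bracket 20 n (by omega) (by omega)]
    simp only [binsA, scanBinsA, labelsB, decide_eq_true_eq, Bool.and_eq_true, and_true]
    split_ifs <;> first | rfl | (exfalso; omega)
  · have hge := bitLength_ge_of_le 21 n (by omega)
    have hmin : min (PySem.Int.bitLength n - 15) 7 = 7 := by omega
    rw [hmin]
    simp only [binsA, scanBinsA, labelsB, decide_eq_true_eq, Bool.and_eq_true, and_true]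
    split_ifs <;> first | rfl | (exfalso; omega)
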